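-- pv_equiv track=rewrite | github.com/alphafan/Data_Structure_And_Algorithms | dynamic/bitonic_sequence.py | maxBitonicSeq
-- ===== SOURCE A (Python) =====
-- def maxBitonicSeq(nums):
--     increase = [1] * len(nums)
--     for i in range(1, len(nums)):
--         if nums[i] >= nums[i - 1]:
--             increase[i] = increase[i - 1] + 1
--
--     decrease = [1] * len(nums)
--     for i in range(len(nums) - 2, -1, -1):
--         if nums[i] >= nums[i + 1]:
--             decrease[i] = decrease[i + 1] + 1
--
--     bitonic = [i + d - 1 for i, d in zip(increase, decrease)]
--     maxLength = max(bitonic)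
--
--     return maxLength
-- ===== SOURCE B (Python) =====
-- def maxBitonicSeq(nums):
--     # One forward scan with three scalars instead of two DP arrays.
--     # inc = length of the non-decreasing run ending here;
--     # cur = bitonic length of the window whose descent ends here;
--     # ans = best seen so far.
--     it = iter(nums)
--     try:
--         prev = next(it)
--     except StopIteration:
--         raise ValueError("maxBitonicSeq() arg is an empty sequence")
--     inc = cur = ans = 1
--     for x in it:
--         inc = inc + 1 if x >= prev else 1
--         cur = cur + 1 if x <= prev else inc
--         if cur > ans:
--             ans = cur
--         prev = x
--     return ans
-- ===== Notes on version B (the rewrite author's own statement) =====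
-- stated objective: simpler
-- what changed: Replaces the two index-loop DP arrays (forward increase[], backward decrease[]) combined by zip/max with a single forward scan over the elements keeping three scalars (current non-decreasing run length, current bitonic window length, running best).
import Mathlib
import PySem

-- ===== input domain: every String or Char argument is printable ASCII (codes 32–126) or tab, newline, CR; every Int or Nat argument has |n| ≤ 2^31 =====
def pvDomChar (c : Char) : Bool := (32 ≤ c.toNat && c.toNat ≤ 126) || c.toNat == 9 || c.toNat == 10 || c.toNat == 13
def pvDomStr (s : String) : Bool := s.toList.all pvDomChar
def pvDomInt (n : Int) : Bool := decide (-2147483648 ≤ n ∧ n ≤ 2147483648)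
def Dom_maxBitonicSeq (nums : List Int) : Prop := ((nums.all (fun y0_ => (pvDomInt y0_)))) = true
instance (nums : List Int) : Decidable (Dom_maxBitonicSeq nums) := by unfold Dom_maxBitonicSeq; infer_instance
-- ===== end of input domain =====

-- B replaces A's two DP arrays and the zip/max combine by a single forward scan with three scalars (objective: simpler).

-- ===== PORT A =====
-- the two index loops become foldl over the same pyRange lists carrying the array; indices are
-- always in range, so pyGetD _ _ 0 and .set i.toNat are exact for Python's nums[i] / increase[i] = …
def maxBitonicSeq (nums : List Int) : Int :=
  let n : Int := nums.length
  let increase : List Int :=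
    (PySem.List.pyRange 1 n 1).foldl
      (fun acc i =>
        if PySem.List.pyGetD nums i 0 ≥ PySem.List.pyGetD nums (i - 1) 0 then
          acc.set i.toNat (PySem.List.pyGetD acc (i - 1) 0 + 1)
        else acc)
      (List.replicate nums.length (1 : Int))
  let decrease : List Int :=
    (PySem.List.pyRange (n - 2) (-1) (-1)).foldl
      (fun acc i =>
        if PySem.List.pyGetD nums i 0 ≥ PySem.List.pyGetD nums (i + 1) 0 then
          acc.set i.toNat (PySem.List.pyGetD acc (i + 1) 0 + 1)
        else acc)
      (List.replicate nums.length (1 : Int))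
  let bitonic : List Int := (increase.zip decrease).map (fun p => p.1 + p.2 - 1)
  -- max(bitonic): raises ValueError on the empty list — excluded by Pre_maxBitonicSeq
  (PySem.List.max? bitonic (fun z : Int => z)).getD 0

-- ===== PORT B =====
-- the for-loop of Source B: state (prev, inc, cur, ans), one element consumed per step
def altGo (prev inc cur ans : Int) : List Int → Int
  | [] => ans
  | x :: xs =>
    let inc' := if x ≥ prev then inc + 1 else 1
    let cur' := if x ≤ prev then cur + 1 else inc'
    altGo x inc' cur' (if cur' > ans then cur' else ans) xs

def maxBitonicSeq_alt (nums : List Int) : Int :=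
  match nums with
  | [] => 0          -- Source B raises ValueError here — excluded by Pre_maxBitonicSeq
  | x :: xs => altGo x 1 1 1 xs

-- ===== PRECONDITION & SPEC =====
-- Pre_ excludes only the empty list, on which A raises ValueError (max of an empty sequence); B raises there too.
def Pre_maxBitonicSeq (nums : List Int) : Prop := nums ≠ []
instance (nums : List Int) : Decidable (Pre_maxBitonicSeq nums) := by unfold Pre_maxBitonicSeq; infer_instance
def pvWitness_maxBitonicSeq : List Int := [1, 3, 2, 2, 5]

def Spec_maxBitonicSeq (nums : List Int) (out : Int) : Prop := out = maxBitonicSeq_alt nums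
instance (nums : List Int) (out : Int) : Decidable (Spec_maxBitonicSeq nums out) := by unfold Spec_maxBitonicSeq; infer_instance

-- ===== CLAIM (what is proved, stated in full; the proofs are below) =====
def Claim_equal_maxBitonicSeq : Prop := ∀ (nums : List Int), Dom_maxBitonicSeq nums → Pre_maxBitonicSeq nums → Spec_maxBitonicSeq nums (maxBitonicSeq nums)

-- ===== LEMMAS AND PROOFS =====

-- dlen p ys = Python A's decrease value at a position holding p followed by ys
def dlen : Int → List Int → Int
  | _, [] => 1
  | p, y :: ys => if p ≥ y then dlen y ys + 1 else 1

-- incFrom p r ys = the increase values of the positions of ys, given the previous element p had increase value r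
def incFrom : Int → Int → List Int → List Int
  | _, _, [] => []
  | p, r, y :: ys => (if y ≥ p then r + 1 else 1) :: incFrom y (if y ≥ p then r + 1 else 1) ys

def decList : List Int → List Int
  | [] => []
  | x :: xs => dlen x xs :: decList xs

-- sMax p inc ys = max of increase+decrease-1 over the positions of p::ys, inc being p's increase value
def sMax : Int → Int → List Int → Int
  | _, inc, [] => inc
  | p, inc, y :: ys => max (inc + dlen p (y :: ys) - 1) (sMax y (if y ≥ p then inc + 1 else 1) ys)

-- rMax p inc cur ys = max of cur and all the cur' values B's scan produces on ys from state (p, inc, cur)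
def rMax : Int → Int → Int → List Int → Int
  | _, _, cur, [] => cur
  | p, inc, cur, y :: ys =>
    max cur (rMax y (if y ≥ p then inc + 1 else 1)
                  (if y ≤ p then cur + 1 else (if y ≥ p then inc + 1 else 1)) ys)

theorem dlen_ge_one (p : Int) (ys : List Int) : 1 ≤ dlen p ys := by
  cases ys with
  | nil => simp [dlen]
  | cons y ys =>
    simp only [dlen]
    split
    · have := dlen_ge_one y ys; omega
    · omega

theorem cur_le_rMax (p inc cur : Int) (ys : List Int) : cur ≤ rMax p inc cur ys := by
  cases ys with
  | nil => simp [rMax]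
  | cons y ys => simp only [rMax]; exact le_max_left _ _

-- B's loop is ans ⊔ rMax
theorem altGo_eq_rMax (ys : List Int) : ∀ p inc cur ans, cur ≤ ans →
    altGo p inc cur ans ys = max ans (rMax p inc cur ys) := by
  induction ys with
  | nil => intro p inc cur ans h; simp only [altGo, rMax]; omega
  | cons y ys ih =>
    intro p inc cur ans h
    simp only [altGo, rMax]
    rw [ih]
    · have h1 := cur_le_rMax y (if y ≥ p then inc + 1 else 1)
        (if y ≤ p then cur + 1 else if y ≥ p then inc + 1 else 1) ys
      omega
    · omega

theorem le_sMax (ys : List Int) (p inc : Int) : inc + dlen p ys - 1 ≤ sMax p inc ys := by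
  cases ys with
  | nil => simp [sMax, dlen]
  | cons y ys => simp only [sMax]; exact le_max_left _ _

-- the core equivalence of the scan with the DP maximum
theorem rMax_eq_sMax (ys : List Int) : ∀ p inc cur, 1 ≤ inc → inc ≤ cur →
    rMax p inc cur ys = max (cur + dlen p ys - 1) (sMax p inc ys) := by
  induction ys with
  | nil => intro p inc cur h1 h2; simp only [rMax, dlen, sMax]; omega
  | cons y ys ih =>
    intro p inc cur h1 h2
    simp only [rMax, sMax, dlen]
    have hd := dlen_ge_one y ys
    by_cases hc : y ≤ p
    · have hc' : p ≥ y := by omega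
      rw [if_pos hc, if_pos hc', ih y _ (cur + 1) (by split <;> omega) (by split <;> omega)]
      omega
    · have hc' : ¬ p ≥ y := by omega
      have hcy : y ≥ p := by omega
      rw [if_neg hc, if_pos hcy, if_neg hc',
        ih y (inc + 1) (inc + 1) (by omega) (by omega)]
      have hs := le_sMax ys y (inc + 1)
      omega
  

theorem length_incFrom (ys : List Int) : ∀ p r, (incFrom p r ys).length = ys.length := by
  induction ys with
  | nil => intro p r; rfl
  | cons y ys ih => intro p r; simp [incFrom, ih]

theorem length_decList (ys : List Int) : (decList ys).length = ys.length := by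
  induction ys with
  | nil => rfl
  | cons y ys ih => simp [decList, ih]

theorem incFrom_snoc (ys : List Int) : ∀ p r y, incFrom p r (ys ++ [y]) =
    incFrom p r ys ++ [if y ≥ ys.getLastD p then (incFrom p r ys).getLastD r + 1 else 1] := by
  induction ys with
  | nil => intro p r y; simp [incFrom]
  | cons z zs ih =>
    intro p r y
    simp only [List.cons_append, incFrom, ih, List.getLastD_cons]

-- foldl max over a cons
theorem foldl_max_cons (l : List Int) : ∀ a c, List.foldl max a (c :: l) = max a (List.foldl max c l) := by
  induction l with
  | nil => intro a c; simp [List.foldl]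
  | cons d l ih =>
    intro a c
    have h1 : List.foldl max a (c :: d :: l) = List.foldl max (max a c) (d :: l) := rfl
    rw [h1, ih (max a c) d, ih c d, max_assoc]

theorem max?_int_cons : ∀ (l : List Int) (a : Int),
    PySem.List.max? (a :: l) (fun z : Int => z) = some (List.foldl max a l)
  | [], a => by simp [PySem.List.max?, List.foldl]
  | b :: l, a => by
      have key : PySem.List.max? (a :: b :: l) (fun z : Int => z)
          = PySem.List.max? (max a b :: l) (fun z : Int => z) := by
        by_cases h : a < b
        · simp [PySem.List.max?, List.foldl, h, max_eq_right (le_of_lt h)]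
        · simp [PySem.List.max?, List.foldl, h, max_eq_left (not_lt.1 h)]
      rw [key, max?_int_cons l (max a b)]
      rfl

theorem getLastD_eq_getElem (l : List Int) (d : Int) (h : l ≠ []) :
    l.getLastD d = l[l.length - 1]'(by simp [List.length_pos_iff.2 h]) := by
  rw [List.getLastD_eq_getLast?, List.getLast?_eq_some_getLast h, Option.getD_some,
    List.getLast_eq_getElem]

theorem getLastD_take (x : Int) (xs : List Int) (k : Nat) (h : k ≤ xs.length) :
    (xs.take k).getLastD x = (x :: xs)[k]'(by simp; omega) := by
  cases k with
  | zero => simp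
  | succ m =>
    have hne : xs.take (m + 1) ≠ [] := by
      apply List.ne_nil_of_length_pos
      simp; omega
    rw [getLastD_eq_getElem _ _ hne]
    simp only [List.getElem_cons_succ]
    have hlen : (xs.take (m + 1)).length = m + 1 := by simp; omega
    rw [List.getElem_take]
    congr 1 <;> omega

-- the invariant of A's increase loop
theorem incAux (x : Int) (xs : List Int) : ∀ (j k : Nat), k + j = xs.length + 1 → 1 ≤ k →
    List.foldl
      (fun acc i =>
        if PySem.List.pyGetD (x :: xs) i 0 ≥ PySem.List.pyGetD (x :: xs) (i - 1) 0 then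
          acc.set i.toNat (PySem.List.pyGetD acc (i - 1) 0 + 1)
        else acc)
      ((1 :: incFrom x 1 (xs.take (k - 1))) ++ List.replicate (xs.length + 1 - k) (1 : Int))
      (PySem.List.pyRange (k : Int) ((xs.length : Int) + 1) 1)
    = 1 :: incFrom x 1 xs := by
  intro j
  induction j with
  | zero =>
    intro k hk h1
    have hk' : k = xs.length + 1 := by omega
    subst hk'
    rw [PySem.List.pyRange_one_eq_nil (by push_cast; omega)]
    simp [List.take_of_length_le (by omega : xs.length ≤ xs.length + 1 - 1)]
  | succ j ih =>
    intro k hk h1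
    obtain ⟨k', rfl⟩ : ∃ k', k = k' + 1 := ⟨k - 1, by omega⟩
    have hkx : k' < xs.length := by omega
    rw [PySem.List.pyRange_one_cons (by push_cast; omega)]
    rw [List.foldl_cons]
    have hFlen : (incFrom x 1 (xs.take k')).length = k' := by
      rw [length_incFrom]; simp; omega
    have hstep :
        (if PySem.List.pyGetD (x :: xs) ((k' + 1 : Nat) : Int) 0 ≥
              PySem.List.pyGetD (x :: xs) (((k' + 1 : Nat) : Int) - 1) 0 then
          ((1 :: incFrom x 1 (xs.take (k' + 1 - 1))) ++
              List.replicate (xs.length + 1 - (k' + 1)) (1 : Int)).set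
            ((k' + 1 : Nat) : Int).toNat
            (PySem.List.pyGetD
              ((1 :: incFrom x 1 (xs.take (k' + 1 - 1))) ++
                List.replicate (xs.length + 1 - (k' + 1)) (1 : Int))
              (((k' + 1 : Nat) : Int) - 1) 0 + 1)
        else
          (1 :: incFrom x 1 (xs.take (k' + 1 - 1))) ++
            List.replicate (xs.length + 1 - (k' + 1)) (1 : Int))
        = (1 :: incFrom x 1 (xs.take (k' + 1 + 1 - 1))) ++
            List.replicate (xs.length + 1 - (k' + 1 + 1)) (1 : Int) := by
      have hg1 : PySem.List.pyGetD (x :: xs) ((k' + 1 : Nat) : Int) 0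
          = xs[k']'(hkx) := by
        rw [PySem.List.pyGetD_eq_getElem _ _ (by positivity) (by simp; push_cast; omega)]
        simp
      have hg2 : PySem.List.pyGetD (x :: xs) (((k' + 1 : Nat) : Int) - 1) 0
          = (x :: xs)[k']'(by simp; omega) := by
        have he : ((k' + 1 : Nat) : Int) - 1 = ((k' : Nat) : Int) := by push_cast; omega
        rw [he, PySem.List.pyGetD_eq_getElem _ _ (by positivity) (by simp; push_cast; omega)]
        simp
      have hg3 : PySem.List.pyGetD
            ((1 :: incFrom x 1 (xs.take (k' + 1 - 1))) ++
              List.replicate (xs.length + 1 - (k' + 1)) (1 : Int))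
            (((k' + 1 : Nat) : Int) - 1) 0
          = (incFrom x 1 (xs.take k')).getLastD 1 := by
        have he : ((k' + 1 : Nat) : Int) - 1 = ((k' : Nat) : Int) := by push_cast; omega
        rw [he, PySem.List.pyGetD_eq_getElem _ _ (by positivity)
          (by simp [length_incFrom]; push_cast; omega)]
        simp only [Int.toNat_natCast, Nat.add_sub_cancel]
        rw [List.getElem_append_left (by simp [hFlen])]
        have hne : (1 : Int) :: incFrom x 1 (xs.take k') ≠ [] := by simp
        rw [show (incFrom x 1 (xs.take k')).getLastD 1
            = ((1 : Int) :: incFrom x 1 (xs.take k')).getLastD 0 from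
          (List.getLastD_cons).symm]
        rw [getLastD_eq_getElem _ 0 hne]
        congr 1
        simp [hFlen]
      simp only [Nat.add_sub_cancel] at *
      have htake : xs.take (k' + 1) = xs.take k' ++ [xs[k']'hkx] :=
        List.take_succ_eq_append_getElem hkx
      have hsnoc := incFrom_snoc (xs.take k') x 1 (xs[k']'hkx)
      have hlast := getLastD_take x xs k' (by omega)
      rw [hg1, hg2, hg3, htake, hsnoc, hlast]
      have hrep : List.replicate (xs.length + 1 - (k' + 1)) (1 : Int)
          = (1 : Int) :: List.replicate (xs.length + 1 - (k' + 1 + 1)) 1 := by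
        rw [← List.replicate_succ]; congr 1; omega
      by_cases hc : xs[k']'hkx ≥ (x :: xs)[k']'(by simp; omega)
      · rw [if_pos hc, if_pos hc]
        rw [hrep]
        have hidx : ((k' + 1 : Nat) : Int).toNat = k' + 1 := by omega
        rw [hidx, List.set_append, if_neg (by simp [hFlen])]
        have hlen1 : ((1 : Int) :: incFrom x 1 (xs.take k')).length = k' + 1 := by
          simp [hFlen]
        rw [hlen1]
        simp only [Nat.sub_self, List.set_cons_zero]
        simp only [List.cons_append, List.append_assoc, List.singleton_append, List.nil_append]
      · rw [if_neg hc, if_neg hc]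
        rw [hrep]
        simp only [List.cons_append, List.append_assoc, List.singleton_append, List.nil_append]
    beta_reduce
    rw [hstep]
    have hcast : (((k' + 1 : Nat) : Int)) + 1 = (((k' + 1 + 1 : Nat)) : Int) := by push_cast; ring
    rw [hcast]
    exact ih (k' + 1 + 1) (by omega) (by omega)

-- A's increase loop computes 1 :: incFrom x 1 xs   (stated for nums = x :: xs)
theorem incLoop_eq (x : Int) (xs : List Int) :
    (PySem.List.pyRange 1 ((x :: xs).length : Int) 1).foldl
      (fun acc i =>
        if PySem.List.pyGetD (x :: xs) i 0 ≥ PySem.List.pyGetD (x :: xs) (i - 1) 0 then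
          acc.set i.toNat (PySem.List.pyGetD acc (i - 1) 0 + 1)
        else acc)
      (List.replicate (x :: xs).length (1 : Int))
    = 1 :: incFrom x 1 xs := by
  have h := incAux x xs xs.length 1 (by omega) (by omega)
  have hacc : (1 :: incFrom x 1 (xs.take (1 - 1))) ++
      List.replicate (xs.length + 1 - 1) (1 : Int) = List.replicate (x :: xs).length (1 : Int) := by
    simp [incFrom, List.replicate_succ]
  have hrange : PySem.List.pyRange ((1 : Nat) : Int) ((xs.length : Int) + 1) 1
      = PySem.List.pyRange 1 (((x :: xs).length : Int)) 1 := by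
    norm_num
  rw [hacc, hrange] at h
  exact h

-- the invariant of A's decrease loop
theorem decAux (nums : List Int) : ∀ (t : Nat), t < nums.length →
    List.foldl
      (fun acc i =>
        if PySem.List.pyGetD nums i 0 ≥ PySem.List.pyGetD nums (i + 1) 0 then
          acc.set i.toNat (PySem.List.pyGetD acc (i + 1) 0 + 1)
        else acc)
      (List.replicate t (1 : Int) ++ decList (nums.drop t))
      (PySem.List.pyRange (((t : Nat) : Int) - 1) (-1) (-1))
    = decList nums := by
  intro t
  induction t with
  | zero =>
    intro _
    rw [show ((0 : Nat) : Int) - 1 = (-1 : Int) by norm_num]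
    rw [PySem.List.pyRange_neg_one_eq_nil (by norm_num)]
    simp
  | succ t ih =>
    intro ht
    have ht1 : t + 1 < nums.length := ht
    have hre : (((t + 1 : Nat)) : Int) - 1 = ((t : Nat) : Int) := by push_cast; omega
    rw [hre, PySem.List.pyRange_neg_one_cons (by omega)]
    rw [List.foldl_cons]
    have hdrop1 : nums.drop (t + 1) = nums[t + 1]'ht1 :: nums.drop (t + 2) :=
      List.drop_eq_getElem_cons ht1
    have hdrop0 : nums.drop t = nums[t]'(by omega) :: nums.drop (t + 1) :=
      List.drop_eq_getElem_cons (by omega)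
    have hstep :
        (if PySem.List.pyGetD nums ((t : Nat) : Int) 0 ≥
              PySem.List.pyGetD nums (((t : Nat) : Int) + 1) 0 then
          (List.replicate (t + 1) (1 : Int) ++ decList (nums.drop (t + 1))).set
            ((t : Nat) : Int).toNat
            (PySem.List.pyGetD (List.replicate (t + 1) (1 : Int) ++ decList (nums.drop (t + 1)))
              (((t : Nat) : Int) + 1) 0 + 1)
        else List.replicate (t + 1) (1 : Int) ++ decList (nums.drop (t + 1)))
        = List.replicate t (1 : Int) ++ decList (nums.drop t) := by
      have hg1 : PySem.List.pyGetD nums ((t : Nat) : Int) 0 = nums[t]'(by omega) := by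
        rw [PySem.List.pyGetD_eq_getElem _ _ (by positivity) (by push_cast; omega)]
        simp
      have hg2 : PySem.List.pyGetD nums (((t : Nat) : Int) + 1) 0 = nums[t + 1]'ht1 := by
        rw [show ((t : Nat) : Int) + 1 = (((t + 1 : Nat)) : Int) by push_cast; ring]
        rw [PySem.List.pyGetD_eq_getElem _ _ (by positivity) (by push_cast; omega)]
        simp
      have hg3 : PySem.List.pyGetD
            (List.replicate (t + 1) (1 : Int) ++ decList (nums.drop (t + 1)))
            (((t : Nat) : Int) + 1) 0
          = dlen (nums[t + 1]'ht1) (nums.drop (t + 2)) := by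
        rw [show ((t : Nat) : Int) + 1 = (((t + 1 : Nat)) : Int) by push_cast; ring]
        rw [PySem.List.pyGetD_eq_getElem _ _ (by positivity)
          (by simp [length_decList]; omega)]
        simp only [Int.toNat_natCast]
        rw [List.getElem_append_right (by simp)]
        simp only [List.length_replicate, Nat.sub_self]
        have hdl : decList (nums.drop (t + 1))
            = dlen (nums[t + 1]'ht1) (nums.drop (t + 2)) :: decList (nums.drop (t + 2)) := by
          rw [hdrop1]; rfl
        simp only [hdl, List.getElem_cons_zero]
      rw [hg1, hg2, hg3, hdrop0, hdrop1]
      simp only [decList, dlen]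
      have hrep : List.replicate (t + 1) (1 : Int)
          = List.replicate t (1 : Int) ++ [(1 : Int)] := List.replicate_succ'
      by_cases hc : nums[t]'(by omega) ≥ nums[t + 1]'ht1
      · rw [if_pos hc, if_pos hc, hrep, List.append_assoc]
        have hidx : ((t : Nat) : Int).toNat = t := by omega
        rw [hidx, List.set_append, if_neg (by simp)]
        simp only [List.length_replicate, Nat.sub_self, List.singleton_append,
          List.set_cons_zero]
      · rw [if_neg hc, if_neg hc, hrep, List.append_assoc]
        simp only [List.singleton_append]
    rw [hstep]
    exact ih (by omega)

-- A's decrease loop computes decList nums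
theorem decLoop_eq (nums : List Int) :
    (PySem.List.pyRange ((nums.length : Int) - 2) (-1) (-1)).foldl
      (fun acc i =>
        if PySem.List.pyGetD nums i 0 ≥ PySem.List.pyGetD nums (i + 1) 0 then
          acc.set i.toNat (PySem.List.pyGetD acc (i + 1) 0 + 1)
        else acc)
      (List.replicate nums.length (1 : Int))
    = decList nums := by
  cases nums with
  | nil =>
    rw [PySem.List.pyRange_neg_one_eq_nil (by norm_num)]
    rfl
  | cons x xs =>
    have h := decAux (x :: xs) xs.length (by simp)
    have hacc : List.replicate xs.length (1 : Int) ++ decList ((x :: xs).drop xs.length)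
        = List.replicate (x :: xs).length (1 : Int) := by
      have hd : (x :: xs).drop xs.length
          = [(x :: xs)[xs.length]'(by simp)] := by
        rw [List.drop_eq_getElem_cons (by simp)]
        simp [List.drop_of_length_le]
      rw [hd]
      simp [decList, dlen, List.replicate_succ', List.length_cons]
    have hrange : ((xs.length : Nat) : Int) - 1 = (((x :: xs).length : Int)) - 2 := by
      simp; omega
    rw [hacc, hrange] at h
    exact h

-- the combine/max step equals sMax
theorem bitonic_max_eq_sMax (ys : List Int) : ∀ p inc,
    List.foldl max (inc + dlen p ys - 1)
      (((incFrom p inc ys).zip (decList ys)).map (fun q => q.1 + q.2 - 1))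
    = sMax p inc ys := by
  induction ys with
  | nil =>
    intro p inc
    simp only [incFrom, decList, List.zip_nil_right, List.map_nil, List.foldl_nil, dlen, sMax]
    omega
  | cons y ys ih =>
    intro p inc
    simp only [incFrom, decList, List.zip_cons_cons, List.map_cons]
    rw [foldl_max_cons, ih y (if y ≥ p then inc + 1 else 1)]
    simp only [sMax]

-- ===== VERDICT (by name: the statement is the Claim_ definition above) =====
theorem maxBitonicSeq_spec : Claim_equal_maxBitonicSeq := by
  intro nums _ hpre
  unfold Spec_maxBitonicSeq
  cases nums with
  | nil => exact absurd rfl hpre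
  | cons x xs =>
    -- B's side: the scan equals sMax x 1 xs
    have hB : maxBitonicSeq_alt (x :: xs) = sMax x 1 xs := by
      show altGo x 1 1 1 xs = sMax x 1 xs
      rw [altGo_eq_rMax xs x 1 1 1 le_rfl]
      rw [max_eq_right (cur_le_rMax x 1 1 xs)]
      rw [rMax_eq_sMax xs x 1 1 le_rfl le_rfl]
      have := le_sMax xs x 1
      omega
    -- A's side: the two DP arrays and the combine equal sMax x 1 xs
    have hA : maxBitonicSeq (x :: xs) = sMax x 1 xs := by
      simp only [maxBitonicSeq]
      rw [incLoop_eq x xs, decLoop_eq (x :: xs)]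
      have hdl : decList (x :: xs) = dlen x xs :: decList xs := rfl
      rw [hdl]
      simp only [List.zip_cons_cons, List.map_cons]
      rw [max?_int_cons, Option.getD_some]
      have h := bitonic_max_eq_sMax xs x 1
      simpa using h
    rw [hA, hB]
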